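-- pv_equiv track=rewrite | github.com/aaroncd2/Architectural-Tessellation-Senior-Design | Tessellation_Engine/tessellation_utilities.py | kivy_to_shapely
-- ===== SOURCE A (Python) =====
-- def kivy_to_shapely(polygon):
--         shapely_points = []
--         xs = []
--         ys = []
--         count = 0
--         for p in polygon:
--             if count % 2 == 0:
--                 xs.append(p)
--             else:
--                 ys.append(p)
--             count = count + 1
--         for (x,y) in zip(xs,ys):
--             shapely_points.append((x,y))
--         return shapely_points
-- ===== SOURCE B (Python) =====
-- def kivy_to_shapely(polygon):
--     # pair consecutive elements directly; an unpaired trailing value is dropped,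
--     # exactly like A's zip of the parity-split lists
--     return list(zip(*[iter(polygon)] * 2))
-- ===== Notes on version B (the rewrite author's own statement) =====
-- stated objective: idiomatic
-- what changed: Replaces the parity counter, the two accumulator lists xs/ys and the second zip-and-append pass with a single pairwise pass that chunks consecutive elements via zip over one shared iterator.
import Mathlib
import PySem

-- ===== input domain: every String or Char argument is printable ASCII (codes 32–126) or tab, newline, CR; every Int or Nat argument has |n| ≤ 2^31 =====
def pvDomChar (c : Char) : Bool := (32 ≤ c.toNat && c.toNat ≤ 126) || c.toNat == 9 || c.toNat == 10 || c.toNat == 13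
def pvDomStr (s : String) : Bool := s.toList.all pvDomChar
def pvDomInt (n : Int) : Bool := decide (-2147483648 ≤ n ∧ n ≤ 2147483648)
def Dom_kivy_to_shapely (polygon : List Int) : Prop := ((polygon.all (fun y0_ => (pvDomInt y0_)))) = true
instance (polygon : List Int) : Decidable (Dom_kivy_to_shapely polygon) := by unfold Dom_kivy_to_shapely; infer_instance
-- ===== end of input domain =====

-- B pairs consecutive elements in one pass instead of A's parity split into xs/ys followed by a zip; same values, idiomatic decomposition.

-- ===== PORT A =====
-- first loop: parity-split with a counter into xs and ys
def kivy_to_shapely_loop (st : List Int × List Int × Int) (p : Int) : List Int × List Int × Int :=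
  let (xs, ys, count) := st
  if count % 2 == 0 then (xs ++ [p], ys, count + 1) else (xs, ys ++ [p], count + 1)

def kivy_to_shapely (polygon : List Int) : List (Int × Int) :=
  let st := polygon.foldl kivy_to_shapely_loop ([], [], 0)
  -- second loop: append each zipped pair to shapely_points
  (st.1.zip st.2.1).foldl (fun acc xy => acc ++ [xy]) []

-- ===== PORT B =====
def kivy_to_shapely_alt : List Int → List (Int × Int)
  | x :: y :: rest => (x, y) :: kivy_to_shapely_alt rest
  | _ => []

-- ===== PRECONDITION & SPEC =====
def Spec_kivy_to_shapely (polygon : List Int) (out : List (Int × Int)) : Prop := out = kivy_to_shapely_alt polygon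
instance (polygon : List Int) (out : List (Int × Int)) : Decidable (Spec_kivy_to_shapely polygon out) := by unfold Spec_kivy_to_shapely; infer_instance

-- ===== CLAIM (what is proved, stated in full; the proofs are below) =====
def Claim_equal_kivy_to_shapely : Prop := ∀ (polygon : List Int), Dom_kivy_to_shapely polygon → Spec_kivy_to_shapely polygon (kivy_to_shapely polygon)

-- ===== LEMMAS AND PROOFS =====
-- even-indexed / odd-indexed elements of a list (characterisation of A's first loop)
def pvEvens : List Int → List Int
  | x :: _ :: r => x :: pvEvens r
  | [x] => [x]
  | [] => []

def pvOdds : List Int → List Int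
  | _ :: y :: r => y :: pvOdds r
  | _ => []

theorem pv_step_even (xs ys : List Int) (c x : Int) (h : c % 2 = 0) :
    kivy_to_shapely_loop (xs, ys, c) x = (xs ++ [x], ys, c + 1) := by
  simp [kivy_to_shapely_loop, h]

theorem pv_step_odd (xs ys : List Int) (c x : Int) (h : c % 2 = 1) :
    kivy_to_shapely_loop (xs, ys, c) x = (xs, ys ++ [x], c + 1) := by
  simp [kivy_to_shapely_loop, h]

theorem pv_loop_char : ∀ (l xs ys : List Int) (c : Int), c % 2 = 0 →
    l.foldl kivy_to_shapely_loop (xs, ys, c) = (xs ++ pvEvens l, ys ++ pvOdds l, c + l.length) := by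
  intro l
  induction l using pvEvens.induct with
  | case1 x y r ih =>
    intro xs ys c hc
    simp only [List.foldl]
    rw [pv_step_even xs ys c x hc, pv_step_odd (xs ++ [x]) ys (c + 1) y (by omega),
        ih (xs ++ [x]) (ys ++ [y]) (c + 1 + 1) (by omega)]
    simp [pvEvens, pvOdds]
    omega
  | case2 x =>
    intro xs ys c hc
    simp only [List.foldl]
    rw [pv_step_even xs ys c x hc]
    simp [pvEvens, pvOdds]
  | case3 =>
    intro xs ys c hc
    simp [pvEvens, pvOdds]

theorem pv_zip_pairs : ∀ (l : List Int), (pvEvens l).zip (pvOdds l) = kivy_to_shapely_alt l := by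
  intro l
  induction l using pvEvens.induct with
  | case1 x y r ih => simp [pvEvens, pvOdds, kivy_to_shapely_alt, ih]
  | case2 x => simp [pvEvens, pvOdds, kivy_to_shapely_alt]
  | case3 => simp [pvEvens, pvOdds, kivy_to_shapely_alt]

theorem pv_foldl_append : ∀ (l : List (Int × Int)) (acc : List (Int × Int)),
    l.foldl (fun a xy => a ++ [xy]) acc = acc ++ l := by
  intro l
  induction l with
  | nil => simp
  | cons x r ih => intro acc; simp [List.foldl, ih]

-- ===== VERDICT (by name: the statement is the Claim_ definition above) =====
theorem kivy_to_shapely_spec : Claim_equal_kivy_to_shapely := by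
  intro polygon _
  unfold Spec_kivy_to_shapely kivy_to_shapely
  rw [pv_loop_char polygon [] [] 0 (by decide)]
  rw [pv_foldl_append _ []]
  simp [pv_zip_pairs]
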